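-- pv_equiv track=rewrite | github.com/Bryce-3D/My-Codeforces-Codes | Python/NOI.PH 2021 Elims/E.py | ordstr
-- ===== SOURCE A (Python) =====
-- def ordstr(order,l):
--     b26 = []
--     while order >= 26:
--         r = order%26
--         b26.append(r)
--         order = (order-r)//26
--     b26.append(order)
--     l_b26 = len(b26)
--
--     let = ''
--     for i in range( l - l_b26 ):
--         let += 'A'
--     for i in range( l_b26 ):
--         let += chr( b26[l_b26-1-i]+65 )
--     return let
-- ===== SOURCE B (Python) =====
-- def _digits(n):
--     if n < 26:
--         return [n]
--     return _digits(n // 26) + [n % 26]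
--
-- def ordstr(order, l):
--     ds = _digits(order)
--     return 'A' * (l - len(ds)) + ''.join(chr(d + 65) for d in ds)
-- ===== Notes on version B (the rewrite author's own statement) =====
-- stated objective: simpler
-- what changed: Replaces the LSB-first digit-gathering while-loop and the two index-driven character-append loops (reverse indexing b26[l_b26-1-i]) with a recursive MSB-first digits helper, a direct map to letters and string-repetition padding.
import Mathlib
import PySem

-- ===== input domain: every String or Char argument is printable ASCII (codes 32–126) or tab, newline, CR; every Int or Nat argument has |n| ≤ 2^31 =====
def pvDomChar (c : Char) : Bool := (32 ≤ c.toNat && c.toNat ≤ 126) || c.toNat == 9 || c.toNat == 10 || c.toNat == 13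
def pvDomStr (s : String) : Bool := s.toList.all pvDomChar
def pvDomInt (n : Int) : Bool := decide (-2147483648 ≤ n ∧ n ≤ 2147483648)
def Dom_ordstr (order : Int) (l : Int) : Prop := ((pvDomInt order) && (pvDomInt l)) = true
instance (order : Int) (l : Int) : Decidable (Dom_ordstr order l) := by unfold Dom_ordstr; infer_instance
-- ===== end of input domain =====

-- B replaces A's LSB-first while-loop and reverse-indexed append loops by a recursive
-- MSB-first digit list, a map to letters and replicate padding (objective: simpler).


-- termination helper for both ports' base-26 division
theorem pvDiv26_lt (o : Int) (h : 26 ≤ o) :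
    (PySem.Int.floordiv (o - PySem.Int.mod o 26) 26).toNat < o.toNat := by
  rw [PySem.Int.mod_eq_emod_of_pos (by norm_num),
      PySem.Int.floordiv_eq_ediv_of_pos (by norm_num)]
  omega

theorem pvDiv26_lt' (o : Int) (h : ¬ o < 26) :
    (PySem.Int.floordiv o 26).toNat < o.toNat := by
  rw [PySem.Int.floordiv_eq_ediv_of_pos (by norm_num)]
  omega

-- ===== PORT A =====
-- the while-loop: gathers base-26 digits least-significant first, then the final append
def ordstrLoop (order : Int) (b26 : List Int) : List Int :=
  if h : 26 ≤ order then
    ordstrLoop (PySem.Int.floordiv (order - PySem.Int.mod order 26) 26)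
      (b26 ++ [PySem.Int.mod order 26])
  else
    b26 ++ [order]
termination_by order.toNat
decreasing_by exact pvDiv26_lt order h

-- chr(x) is ported as Char.ofNat x.toNat; exact here since Pre_ keeps every code in [0, 91)
def ordstr (order : Int) (l : Int) : String :=
  let b26 := ordstrLoop order []
  let lb26 : Int := b26.length
  let let1 := (PySem.List.pyRange 0 (l - lb26) 1).foldl (fun s _ => s ++ ['A']) ([] : List Char)
  let let2 := (PySem.List.pyRange 0 lb26 1).foldl
    (fun s i => s ++ [Char.ofNat ((PySem.List.pyGetD b26 (lb26 - 1 - i) 0) + 65).toNat]) let1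
  String.ofList let2

-- ===== PORT B =====
-- recursive helper: base-26 digits, most significant first
def pvDigits (n : Int) : List Int :=
  if h : n < 26 then [n]
  else pvDigits (PySem.Int.floordiv n 26) ++ [PySem.Int.mod n 26]
termination_by n.toNat
decreasing_by exact pvDiv26_lt' n h

-- 'A' * k with k possibly negative is replicate k.toNat; chr as in port A
def ordstr_alt (order : Int) (l : Int) : String :=
  let ds := pvDigits order
  String.ofList (List.replicate (l - (ds.length : Int)).toNat 'A' ++
    ds.map (fun d => Char.ofNat (d + 65).toNat))

-- ===== PRECONDITION & SPEC =====
-- Pre_ excludes exactly order < -65, where Python's chr(order+65) raises ValueError (in A and in B)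
def Pre_ordstr (order : Int) (l : Int) : Prop := -65 ≤ order
instance (order : Int) (l : Int) : Decidable (Pre_ordstr order l) := by unfold Pre_ordstr; infer_instance
def pvWitness_ordstr : Int × Int := (30, 3)

def Spec_ordstr (order : Int) (l : Int) (out : String) : Prop := out = ordstr_alt order l
instance (order : Int) (l : Int) (out : String) : Decidable (Spec_ordstr order l out) := by unfold Spec_ordstr; infer_instance

-- ===== CLAIM (what is proved, stated in full; the proofs are below) =====
def Claim_equal_ordstr : Prop := ∀ (order : Int) (l : Int), Dom_ordstr order l → Pre_ordstr order l → Spec_ordstr order l (ordstr order l)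

-- ===== LEMMAS AND PROOFS =====

-- the quirky update order = (order - order%26)//26 is just order // 26
theorem pvStep_eq (o : Int) :
    PySem.Int.floordiv (o - PySem.Int.mod o 26) 26 = PySem.Int.floordiv o 26 := by
  rw [PySem.Int.mod_eq_emod_of_pos (by norm_num),
      PySem.Int.floordiv_eq_ediv_of_pos (by norm_num),
      PySem.Int.floordiv_eq_ediv_of_pos (by norm_num)]
  omega

-- A's loop result is B's digit list reversed
theorem pvLoop_eq_digits (o : Int) (acc : List Int) :
    ordstrLoop o acc = acc ++ (pvDigits o).reverse := by
  induction o, acc using ordstrLoop.induct with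
  | case1 o acc h ih =>
      rw [ordstrLoop, dif_pos h, ih, pvStep_eq]
      conv_rhs => rw [pvDigits]
      rw [dif_neg (show ¬ o < 26 by omega)]
      simp
  | case2 o acc h =>
      rw [ordstrLoop, dif_neg h, pvDigits, dif_pos (by omega)]
      simp

-- the padding loop is replicate
theorem pvPad_eq (k : Int) :
    (PySem.List.pyRange 0 k 1).foldl (fun s _ => s ++ ['A']) ([] : List Char)
      = List.replicate k.toNat 'A' := by
  rw [PySem.List.foldl_append_singleton_eq_map]
  simp [PySem.List.pyRange_one, List.eq_replicate_iff]

-- reading a list by reverse index m-1-i over range(m) yields the list in order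
theorem pvRead_eq (d : List Int) (f : Int → Char) (init : List Char) :
    (PySem.List.pyRange 0 (d.reverse.length : Int) 1).foldl
      (fun s i => s ++ [f (PySem.List.pyGetD d.reverse ((d.reverse.length : Int) - 1 - i) 0)]) init
      = init ++ d.map f := by
  rw [PySem.List.foldl_append_singleton_eq_map]
  congr 1
  rw [PySem.List.pyRange_one]
  simp only [zero_add, Int.sub_zero, List.map_map, List.length_reverse]
  apply List.ext_getElem
  · simp
  · intro k h1 h2
    simp only [List.getElem_map, List.getElem_range, Function.comp_apply]
    have hk : k < d.length := by simpa using h1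
    have hidx : (0:Int) ≤ (d.length : Int) - 1 - k ∧ (d.length : Int) - 1 - k < (d.reverse.length : Int) := by
      constructor <;> simp <;> omega
    rw [PySem.List.pyGetD_eq_getElem _ _ hidx.1 hidx.2]
    congr 1
    rw [List.getElem_reverse]
    congr 1
    omega

-- ===== VERDICT (by name: the statement is the Claim_ definition above) =====
theorem ordstr_spec : Claim_equal_ordstr := by
  intro order l _ _
  unfold Spec_ordstr ordstr ordstr_alt
  rw [pvLoop_eq_digits order []]
  simp only [List.nil_append]
  rw [pvPad_eq, pvRead_eq (pvDigits order) (fun d => Char.ofNat (d + 65).toNat)]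
  simp
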